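-- pv_equiv track=rewrite | github.com/nooy-gnues-ho/MQTT | emergency.py | b_numbers
-- ===== SOURCE A (Python) =====
-- def b_numbers(string): #payload 건강정보값 추출 함수
--     numbers = ""
--     found_alpha = False
--     for char in string:
--         if char.isalpha():
--             found_alpha = True
--         elif found_alpha and char.isdigit():
--             numbers += char
--         elif found_alpha and not char.isdigit():
--             break
--     return int(numbers) if numbers else 0
-- ===== SOURCE B (Python) =====
-- def b_numbers(string):
--     # index pipeline: find the first letter, find the end of the letters-or-digits
--     # run after it, then keep the digits of that slice
--     n = len(string)
--     start = next((i for i in range(n) if string[i].isalpha()), n)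
--     end = next((i for i in range(start, n)
--                 if not (string[i].isalpha() or string[i].isdigit())), n)
--     digits = "".join(c for c in string[start:end] if c.isdigit())
--     return int(digits) if digits else 0
-- ===== Notes on version B (the rewrite author's own statement) =====
-- stated objective: alternative
-- what changed: Replaced the flag-driven single loop with a three-stage index pipeline: find the first letter's index, find the end of the letters-or-digits run after it, then slice and filter the digits out of that run.
import Mathlib
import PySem

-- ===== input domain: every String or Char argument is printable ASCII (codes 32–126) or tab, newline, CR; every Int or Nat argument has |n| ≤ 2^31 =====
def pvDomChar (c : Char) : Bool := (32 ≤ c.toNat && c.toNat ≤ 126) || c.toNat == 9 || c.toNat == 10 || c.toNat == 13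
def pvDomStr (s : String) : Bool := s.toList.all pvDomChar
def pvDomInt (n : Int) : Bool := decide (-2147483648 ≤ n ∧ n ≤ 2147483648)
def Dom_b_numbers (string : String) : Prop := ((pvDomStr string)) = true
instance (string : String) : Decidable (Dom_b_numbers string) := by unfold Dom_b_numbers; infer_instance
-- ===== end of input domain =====

-- B replaces A's flag-driven loop by an index pipeline (find first letter, find end of run,
-- slice, filter digits); same cost, different decomposition.

-- ===== PORT A =====
-- the for-loop of A: state = (found_alpha, numbers); early 'break' returns numbers
def bLoopA : List Char → Bool → List Char → List Char
  | [], _, nums => nums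
  | c :: rest, fa, nums =>
    if PySem.Chars.isalpha c then bLoopA rest true nums
    else if fa && PySem.Chars.isdigit c then bLoopA rest fa (nums ++ [c])
    else if fa && !PySem.Chars.isdigit c then nums
    else bLoopA rest fa nums

def b_numbers (string : String) : Int :=
  let nums := bLoopA string.toList false []
  -- int(numbers) if numbers else 0; nums holds only ASCII digits, so int() cannot raise
  if nums.isEmpty then 0 else (PySem.Int.ofChars? nums).getD 0

-- ===== PORT B =====
-- next((i for i in range(n) if string[i].isalpha()), n): offset of the first letter
def bFindStart : List Char → Nat
  | [] => 0
  | c :: r => if PySem.Chars.isalpha c then 0 else bFindStart r + 1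

-- next((i for i in range(start, n) if not (alpha or digit)), n), relative to start
def bFindEnd : List Char → Nat
  | [] => 0
  | c :: r => if PySem.Chars.isalpha c || PySem.Chars.isdigit c then bFindEnd r + 1 else 0

def b_numbers_alt (string : String) : Int :=
  let l := string.toList
  let start := bFindStart l
  let stop := start + bFindEnd (l.drop start)
  let digits := (PySem.List.slice l (some (start : Int)) (some (stop : Int))).filter
      PySem.Chars.isdigit
  if digits.isEmpty then 0 else (PySem.Int.ofChars? digits).getD 0

-- ===== PRECONDITION & SPEC =====
def Spec_b_numbers (string : String) (out : Int) : Prop := out = b_numbers_alt string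
instance (string : String) (out : Int) : Decidable (Spec_b_numbers string out) := by unfold Spec_b_numbers; infer_instance

-- ===== CLAIM (what is proved, stated in full; the proofs are below) =====
def Claim_equal_b_numbers : Prop := ∀ (string : String), Dom_b_numbers string → Spec_b_numbers string (b_numbers string)

-- ===== LEMMAS AND PROOFS =====

theorem alpha_not_digit (c : Char) (h : PySem.Chars.isalpha c = true) :
    PySem.Chars.isdigit c = false := by
  simp only [PySem.Chars.isalpha, PySem.Chars.isupper, PySem.Chars.islower, Bool.or_eq_true,
    Bool.and_eq_true, decide_eq_true_eq] at h
  simp only [PySem.Chars.isdigit, Bool.and_eq_false_iff, decide_eq_false_iff_not, Char.not_le]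
  have e1 : 'A'.val.toNat = 65 := rfl
  have e2 : 'Z'.val.toNat = 90 := rfl
  have e3 : 'a'.val.toNat = 97 := rfl
  have e4 : 'z'.val.toNat = 122 := rfl
  have e5 : '0'.val.toNat = 48 := rfl
  have e6 : '9'.val.toNat = 57 := rfl
  rcases h with ⟨h1, h2⟩ | ⟨h1, h2⟩ <;>
    simp only [Char.le_def, Char.lt_def, UInt32.le_iff_toNat_le, UInt32.lt_iff_toNat_lt,
      e1, e2, e3, e4, e5, e6] at * <;> omega

theorem take_bFindEnd (m : List Char) :
    m.take (bFindEnd m) =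
      m.takeWhile (fun c => PySem.Chars.isalpha c || PySem.Chars.isdigit c) := by
  induction m with
  | nil => rfl
  | cons c r ih =>
    by_cases h : (PySem.Chars.isalpha c || PySem.Chars.isdigit c) = true
    · simp [bFindEnd, h, ih]
    · simp at h
      simp [bFindEnd, h]

theorem bLoopA_true (l : List Char) (nums : List Char) :
    bLoopA l true nums =
      nums ++ (l.takeWhile (fun c => PySem.Chars.isalpha c || PySem.Chars.isdigit c)).filter
        PySem.Chars.isdigit := by
  induction l generalizing nums with
  | nil => simp [bLoopA]
  | cons c r ih =>
    by_cases ha : PySem.Chars.isalpha c = true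
    · simp [bLoopA, ha, alpha_not_digit c ha, ih]
    · by_cases hd : PySem.Chars.isdigit c = true
      · simp only [bLoopA, ha, hd, Bool.and_true, if_true]
        simp [ha, hd, ih]
      · simp only [bLoopA, ha, hd, Bool.and_false]
        simp at ha hd
        simp [ha, hd]

theorem bLoopA_false (l : List Char) :
    bLoopA l false [] =
      ((l.drop (bFindStart l)).takeWhile
          (fun c => PySem.Chars.isalpha c || PySem.Chars.isdigit c)).filter
        PySem.Chars.isdigit := by
  induction l with
  | nil => rfl
  | cons c r ih =>
    by_cases ha : PySem.Chars.isalpha c = true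
    · simp [bLoopA, ha, bFindStart, alpha_not_digit c ha, bLoopA_true]
    · by_cases hd : PySem.Chars.isdigit c = true
      · simp only [bLoopA, ha, Bool.false_and]
        simp [bFindStart, ha, ih]
      · simp only [bLoopA, ha, Bool.false_and]
        simp [bFindStart, ha, ih]

theorem nums_eq (l : List Char) :
    bLoopA l false [] =
      (PySem.List.slice l (some ((bFindStart l : Nat) : Int))
          (some ((bFindStart l + bFindEnd (l.drop (bFindStart l)) : Nat) : Int))).filter
        PySem.Chars.isdigit := by
  have hs : PySem.List.slice l (some ((bFindStart l : Nat) : Int))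
      (some ((bFindStart l + bFindEnd (l.drop (bFindStart l)) : Nat) : Int)) =
      (l.drop (bFindStart l)).take (bFindEnd (l.drop (bFindStart l))) := by
    rw [PySem.List.slice_natCast]
    congr 1
    omega
  rw [hs, take_bFindEnd, bLoopA_false]

-- ===== VERDICT (by name: the statement is the Claim_ definition above) =====
theorem b_numbers_spec : Claim_equal_b_numbers := by
  intro string _
  unfold Spec_b_numbers b_numbers b_numbers_alt
  simp only [nums_eq string.toList]
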